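-- pv_equiv track=rewrite | github.com/Elgiambu/Int_Programacion | pyhton/parciales/parcial 2/Parcial2.py | matriz_cuasi_decreciente
-- ===== SOURCE A (Python) =====
-- from typing import List
--
-- def matriz_cuasi_decreciente(matriz:List[List[int]])->bool:
--     res:bool=True
--     m_transpuesta:List[List[int]]=traspuesta(matriz)
--     i:int=0
--     list_aux:List[int]=[]
--     for i in m_transpuesta:
--         list_aux.append(mayor(i))
--     j:int=0
--     while j+1 < len(list_aux):
--         if list_aux[j] <= list_aux[j+1]:
--             res= False
--         j+=1
--     return res
--
-- def mayor(columna:List[int])-> int: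
--     res:int=columna[0]
--     for i in columna:
--         if i >= res:
--             res = i
--     return res
--
-- def traspuesta(matriz:List[List[int]])->List[List[int]]:
--     res:List[List[int]]=[]
--     j:int=0
--     while j < len(matriz[0]):
--         list:List[int]=[]
--         for i in matriz:
--             list.append(i[j])
--         res.append(list)
--         j+=1
--     return res
-- ===== SOURCE B (Python) =====
-- from typing import List
--
-- def matriz_cuasi_decreciente(matriz: List[List[int]]) -> bool:
--     maxes = list(matriz[0])
--     for fila in matriz[1:]:
--         maxes = [max(m, fila[j]) for j, m in enumerate(maxes)]
--     return all(maxes[j] > maxes[j + 1] for j in range(len(maxes) - 1))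
-- ===== Notes on version B (the rewrite author's own statement) =====
-- stated objective: simpler
-- what changed: B folds a running column-maxima vector over the rows in one row-major pass (no transpose list, no per-column re-scan) and checks strict decrease with all(); A builds the full transposed matrix, recomputes each column's max with a helper, then flags failures in a while loop.
import Mathlib
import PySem

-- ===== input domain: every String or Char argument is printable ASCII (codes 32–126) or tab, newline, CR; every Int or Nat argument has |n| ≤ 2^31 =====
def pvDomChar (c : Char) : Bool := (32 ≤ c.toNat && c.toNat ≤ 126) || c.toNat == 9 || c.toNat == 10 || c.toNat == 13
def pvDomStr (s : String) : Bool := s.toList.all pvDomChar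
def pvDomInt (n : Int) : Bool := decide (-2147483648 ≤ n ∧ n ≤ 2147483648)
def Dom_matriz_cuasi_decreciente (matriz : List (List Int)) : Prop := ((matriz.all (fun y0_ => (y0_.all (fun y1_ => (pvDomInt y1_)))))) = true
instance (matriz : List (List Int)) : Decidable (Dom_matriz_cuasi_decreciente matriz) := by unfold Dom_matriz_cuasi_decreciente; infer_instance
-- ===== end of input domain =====

-- B replaces A's transpose-then-scan-columns structure by one row-major fold of a running
-- column-maxima vector plus an all() check (simpler, less extra space); return value only.

-- ===== PORT A =====
-- mayor(columna): res = columna[0]; for i in columna: if i >= res: res = i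
def pvMayor (columna : List Int) : Int :=
  columna.foldl (fun res i => if i ≥ res then i else res) (PySem.List.pyGetD columna 0 0)

-- traspuesta(matriz): while j < len(matriz[0]): column j by appending i[j] for each row i
def pvTraspuesta (matriz : List (List Int)) : List (List Int) :=
  (PySem.List.pyRange 0 ((matriz.headD []).length : Int) 1).foldl
    (fun res j => res ++ [matriz.foldl (fun l i => l ++ [PySem.List.pyGetD i j 0]) []]) []

def matriz_cuasi_decreciente (matriz : List (List Int)) : Bool :=
  let mT := pvTraspuesta matriz
  let listAux := mT.foldl (fun acc i => acc ++ [pvMayor i]) []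
  -- while j+1 < len(list_aux): if list_aux[j] <= list_aux[j+1]: res = False
  (PySem.List.pyRange 0 ((listAux.length : Int) - 1) 1).foldl
    (fun res j => if PySem.List.pyGetD listAux j 0 ≤ PySem.List.pyGetD listAux (j + 1) 0
                  then false else res) true

-- ===== PORT B =====
def matriz_cuasi_decreciente_alt (matriz : List (List Int)) : Bool :=
  let maxes0 := matriz.headD []     -- list(matriz[0]); matriz[0] raises on [] (outside Pre_)
  let maxes := (matriz.drop 1).foldl
    (fun maxes fila =>
      (PySem.List.enumerate maxes 0).map (fun jm => max jm.2 (PySem.List.pyGetD fila jm.1 0)))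
    maxes0
  (PySem.List.pyRange 0 ((maxes.length : Int) - 1) 1).all
    (fun j => PySem.List.pyGetD maxes j 0 > PySem.List.pyGetD maxes (j + 1) 0)

-- ===== PRECONDITION & SPEC =====
-- A raises IndexError on the empty matrix (matriz[0]) and whenever some row is shorter than
-- the first row (i[j] while transposing); Pre_ excludes exactly those inputs.
def Pre_matriz_cuasi_decreciente (matriz : List (List Int)) : Prop :=
  matriz ≠ [] ∧ ∀ fila ∈ matriz, (matriz.headD []).length ≤ fila.length
instance (matriz : List (List Int)) : Decidable (Pre_matriz_cuasi_decreciente matriz) := by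
  unfold Pre_matriz_cuasi_decreciente; infer_instance

def pvWitness_matriz_cuasi_decreciente : List (List Int) := [[5, 2], [3, 1]]

def Spec_matriz_cuasi_decreciente (matriz : List (List Int)) (out : Bool) : Prop :=
  out = matriz_cuasi_decreciente_alt matriz
instance (matriz : List (List Int)) (out : Bool) : Decidable (Spec_matriz_cuasi_decreciente matriz out) := by
  unfold Spec_matriz_cuasi_decreciente; infer_instance

-- ===== CLAIM (what is proved, stated in full; the proofs are below) =====
def Claim_equal_matriz_cuasi_decreciente : Prop :=
  ∀ (matriz : List (List Int)), Dom_matriz_cuasi_decreciente matriz →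
    Pre_matriz_cuasi_decreciente matriz →
    Spec_matriz_cuasi_decreciente matriz (matriz_cuasi_decreciente matriz)

-- ===== LEMMAS AND PROOFS =====

-- proof-only name for B's one-row update
def pvStep (maxes fila : List Int) : List Int :=
  (PySem.List.enumerate maxes 0).map (fun jm => max jm.2 (PySem.List.pyGetD fila jm.1 0))

-- A's result-flag loop: once False, always False; equals "no failing adjacent pair".
theorem pv_foldl_flag (P : Int → Prop) [DecidablePred P] (l : List Int) (b : Bool) :
    l.foldl (fun res j => if P j then false else res) b
      = (b && l.all (fun j => decide ¬ P j)) := by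
  induction l generalizing b with
  | nil => simp
  | cons a t ih =>
      simp only [List.foldl_cons, List.all_cons, ih]
      by_cases hP : P a <;> simp [hP]

-- pvMayor on a nonempty column is a running max from its head.
theorem pv_mayor_eq (c : Int) (cs : List Int) :
    pvMayor (c :: cs) = cs.foldl max c := by
  unfold pvMayor
  have hstep : (fun res i => if i ≥ res then i else res) = (fun res i : Int => max res i) := by
    funext res i
    rcases le_total res i with h | h
    · simp [h]
    · by_cases he : res ≤ i
      · simp [le_antisymm h he]
      · simp [he, max_eq_left h]
  simp [PySem.List.pyGetD_zero_cons, hstep]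

theorem pv_step_length (maxes fila : List Int) :
    (pvStep maxes fila).length = maxes.length := by
  simp [pvStep, PySem.List.length_enumerate]

theorem pv_step_getD (maxes fila : List Int) (k : Nat) (hk : k < maxes.length) :
    (pvStep maxes fila).getD k 0 = max (maxes.getD k 0) (PySem.List.pyGetD fila (k : Int) 0) := by
  have hk' : k < (pvStep maxes fila).length := by rw [pv_step_length]; exact hk
  rw [List.getD_eq_getElem _ _ hk', List.getD_eq_getElem _ _ hk]
  simp [pvStep, PySem.List.getElem_enumerate]

-- B's fold over the remaining rows preserves the length of the maxima vector…
theorem pv_fold_length (rest : List (List Int)) :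
    ∀ maxes : List Int, (rest.foldl pvStep maxes).length = maxes.length := by
  induction rest with
  | nil => intro maxes; rfl
  | cons r rs ih => intro maxes; simp [List.foldl_cons, ih, pv_step_length]

-- …and its entry k is the running max of column k.
theorem pv_fold_getD (rest : List (List Int)) :
    ∀ (maxes : List Int) (k : Nat), k < maxes.length →
      (rest.foldl pvStep maxes).getD k 0
        = rest.foldl (fun acc r => max acc (PySem.List.pyGetD r (k : Int) 0)) (maxes.getD k 0) := by
  induction rest with
  | nil => intro maxes k _; rfl
  | cons r rs ih =>
      intro maxes k hk
      simp only [List.foldl_cons]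
      rw [ih (pvStep maxes r) k (by rw [pv_step_length]; exact hk), pv_step_getD maxes r k hk]

-- The two intermediate lists coincide: A's list of column maxima = B's maxes vector.
theorem pv_lists_eq (r0 : List Int) (rest : List (List Int)) :
    ((PySem.List.pyRange 0 (r0.length : Int) 1).map
        (fun j => pvMayor ((r0 :: rest).map (fun i => PySem.List.pyGetD i j 0))))
      = rest.foldl pvStep r0 := by
  apply List.ext_getElem
  · simp [PySem.List.length_pyRange_one, pv_fold_length]
  · intro k h1 h2
    have hk : k < r0.length := by
      simpa [PySem.List.length_pyRange_one] using h1
    have hrange : k < (PySem.List.pyRange 0 (r0.length : Int) 1).length := by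
      simpa [PySem.List.length_pyRange_one] using hk
    rw [List.getElem_map]
    rw [PySem.List.getElem_pyRange_one]
    simp only [zero_add]
    have hcol : ((r0 :: rest).map (fun i => PySem.List.pyGetD i (k : Int) 0))
        = PySem.List.pyGetD r0 (k : Int) 0
          :: rest.map (fun i => PySem.List.pyGetD i (k : Int) 0) := by
      simp
    rw [hcol, pv_mayor_eq, List.foldl_map]
    have hget : PySem.List.pyGetD r0 (k : Int) 0 = r0.getD k 0 := by
      simp [PySem.List.pyGetD_natCast]
    rw [hget, ← List.getD_eq_getElem _ 0 h2, pv_fold_getD rest r0 k hk]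

-- A's list_aux for a nonempty matrix is B's maxes vector.
theorem pv_listAux_eq (r0 : List Int) (rest : List (List Int)) :
    (pvTraspuesta (r0 :: rest)).foldl (fun acc i => acc ++ [pvMayor i]) []
      = rest.foldl pvStep r0 := by
  unfold pvTraspuesta
  simp only [List.headD_cons, PySem.List.foldl_append_singleton_eq_map, List.nil_append,
    List.map_map]
  exact pv_lists_eq r0 rest

-- ===== VERDICT (by name: the statement is the Claim_ definition above) =====
theorem matriz_cuasi_decreciente_spec : Claim_equal_matriz_cuasi_decreciente := by
  intro matriz _ hpre
  obtain ⟨hne, hlen⟩ := hpre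
  obtain ⟨r0, rest, rfl⟩ : ∃ r0 rest, matriz = r0 :: rest := by
    cases matriz with
    | nil => exact absurd rfl hne
    | cons a t => exact ⟨a, t, rfl⟩
  unfold Spec_matriz_cuasi_decreciente matriz_cuasi_decreciente matriz_cuasi_decreciente_alt
  simp only [List.headD_cons, List.drop_one, List.tail_cons]
  rw [pv_listAux_eq]
  rw [show (fun (maxes fila : List Int) =>
        (PySem.List.enumerate maxes 0).map
          (fun jm => max jm.2 (PySem.List.pyGetD fila jm.1 0))) = pvStep from rfl]
  rw [pv_foldl_flag]
  simp [not_le]
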